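-- pv_equiv track=rewrite | github.com/TryUnder/DeTryRepo | University/Developer_Environment/Bash/Python/zad_7.5.py | validatePesel
-- ===== SOURCE A (Python) =====
-- def validatePesel(pesel) -> bool:
--     if len(pesel) != 11 :
--         return False
--
--     multipliers = [1, 3, 7, 9, 1, 3, 7, 9, 1, 3]
--     sum_t = 0
--
--     for i in range(0, len(pesel) - 1):
--         sum_t += int(pesel[i]) * multipliers[i % 4]
--
--     modulo = sum_t % 10
--     lastDigit = int(pesel[-1])
--
--     if modulo == 0:
--         return lastDigit == 0
--     else:
--         return lastDigit == 10 - modulo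
-- ===== SOURCE B (Python) =====
-- def validatePesel(pesel) -> bool:
--     if len(pesel) != 11:
--         return False
--     weights = [1, 3, 7, 9, 1, 3, 7, 9, 1, 3, 1]
--     total = sum(int(c) * w for c, w in zip(pesel, weights))
--     return total % 10 == 0
-- ===== Notes on version B (the rewrite author's own statement) =====
-- stated objective: simpler
-- what changed: Replaces the 10-digit weighted sum with a modulo-4 multiplier lookup plus a two-way case split on the check digit by one weighted sum over all 11 digits with a full weight table and a single divisibility-by-10 test of the total.
import Mathlib
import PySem

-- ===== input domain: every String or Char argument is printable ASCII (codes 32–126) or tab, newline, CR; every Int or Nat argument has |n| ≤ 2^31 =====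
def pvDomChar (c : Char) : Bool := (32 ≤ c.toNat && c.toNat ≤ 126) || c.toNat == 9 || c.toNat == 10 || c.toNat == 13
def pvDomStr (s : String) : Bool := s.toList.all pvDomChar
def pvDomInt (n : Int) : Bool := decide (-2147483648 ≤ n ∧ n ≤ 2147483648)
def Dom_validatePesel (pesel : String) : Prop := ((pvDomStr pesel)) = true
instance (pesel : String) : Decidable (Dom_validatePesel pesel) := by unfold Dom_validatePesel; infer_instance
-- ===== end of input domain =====

-- B replaces A's 10-digit sum with a mod-4 multiplier lookup plus a case split on the
-- check digit by one weighted sum over all 11 digits and a single 'total % 10 == 0' test (simpler).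

-- ===== PORT A =====
-- int(s[i]) for a possibly negative index i; the getD 0 default is unreachable under Pre_
-- (the index is in range and the character is a digit, so pyGet? and ofChars? both return some).
def pyIntAt (s : String) (i : Int) : Int :=
  ((PySem.Str.pyGet? s i).bind (fun c => PySem.Int.ofChars? [c])).getD 0

def validatePesel (pesel : String) : Bool :=
  if PySem.Str.len pesel ≠ 11 then false
  else
    let multipliers : List Int := [1, 3, 7, 9, 1, 3, 7, 9, 1, 3]
    let sum_t : Int :=
      (PySem.List.pyRange 0 (PySem.Str.len pesel - 1) 1).foldl
        (fun acc i => acc + pyIntAt pesel i * PySem.List.pyGetD multipliers (PySem.Int.mod i 4) 0) 0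
    let modulo := PySem.Int.mod sum_t 10
    let lastDigit := pyIntAt pesel (-1)
    if modulo = 0 then lastDigit == 0 else lastDigit == 10 - modulo

-- ===== PORT B =====
-- int(c) for a single character c; the getD 0 default is unreachable under Pre_ (c is a digit).
def pyIntOfChar (c : Char) : Int := (PySem.Int.ofChars? [c]).getD 0

def validatePesel_alt (pesel : String) : Bool :=
  if PySem.Str.len pesel ≠ 11 then false
  else
    let weights : List Int := [1, 3, 7, 9, 1, 3, 7, 9, 1, 3, 1]
    let total : Int := ((pesel.toList.zip weights).map (fun cw => pyIntOfChar cw.1 * cw.2)).sum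
    PySem.Int.mod total 10 == 0

-- ===== PRECONDITION & SPEC =====
-- Pre_ excludes exactly the inputs where Python A raises ValueError: an 11-character
-- string containing a non-digit (int() fails on it); strings of any other length are admitted.
def Pre_validatePesel (pesel : String) : Prop :=
  pesel.toList.length = 11 → pesel.toList.all Char.isDigit = true
instance (pesel : String) : Decidable (Pre_validatePesel pesel) := by
  unfold Pre_validatePesel; infer_instance

def pvWitness_validatePesel : String := "44051401359"

def Spec_validatePesel (pesel : String) (out : Bool) : Prop := out = validatePesel_alt pesel
instance (pesel : String) (out : Bool) : Decidable (Spec_validatePesel pesel out) := by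
  unfold Spec_validatePesel; infer_instance

-- ===== CLAIM (what is proved, stated in full; the proofs are below) =====
def Claim_equal_validatePesel : Prop := ∀ (pesel : String), Dom_validatePesel pesel → Pre_validatePesel pesel → Spec_validatePesel pesel (validatePesel pesel)

-- ===== LEMMAS AND PROOFS =====

theorem digit_mem (c : Char) (h : c.isDigit) :
    c ∈ ['0','1','2','3','4','5','6','7','8','9'] := by
  simp only [Char.isDigit, decide_eq_true_eq, Bool.and_eq_true] at h
  obtain ⟨h1, h2⟩ := h
  have b1 : 48 ≤ c.val.toNat := UInt32.le_iff_toNat_le.mp h1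
  have b2 : c.val.toNat ≤ 57 := UInt32.le_iff_toNat_le.mp h2
  have hc : ∀ (d : Char), c.val.toNat = d.val.toNat → c = d := by
    intro d hd; exact Char.ext (UInt32.toNat_inj.mp hd)
  have hv : c.val.toNat = 48 ∨ c.val.toNat = 49 ∨ c.val.toNat = 50 ∨ c.val.toNat = 51 ∨
      c.val.toNat = 52 ∨ c.val.toNat = 53 ∨ c.val.toNat = 54 ∨ c.val.toNat = 55 ∨
      c.val.toNat = 56 ∨ c.val.toNat = 57 := by omega
  rcases hv with h|h|h|h|h|h|h|h|h|h
  · simp [hc '0' (by rw [h]; decide)]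
  · simp [hc '1' (by rw [h]; decide)]
  · simp [hc '2' (by rw [h]; decide)]
  · simp [hc '3' (by rw [h]; decide)]
  · simp [hc '4' (by rw [h]; decide)]
  · simp [hc '5' (by rw [h]; decide)]
  · simp [hc '6' (by rw [h]; decide)]
  · simp [hc '7' (by rw [h]; decide)]
  · simp [hc '8' (by rw [h]; decide)]
  · simp [hc '9' (by rw [h]; decide)]

-- int("<digit>") = its value, and digits are bounded
theorem ofChars?_digit (c : Char) (h : c.isDigit) :
    PySem.Int.ofChars? [c] = some ((c.toNat : Int) - 48) := by
  have := digit_mem c h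
  fin_cases this <;> decide

theorem digit_bounds (c : Char) (h : c.isDigit) : 48 ≤ c.toNat ∧ c.toNat ≤ 57 := by
  have := digit_mem c h
  fin_cases this <;> decide

theorem exists11 (l : List Char) (hl : l.length = 11) :
    ∃ a b c d e f g h i j k, l = [a,b,c,d,e,f,g,h,i,j,k] := by
  obtain _|⟨a,l⟩ := l; · simp at hl
  obtain _|⟨b,l⟩ := l; · simp at hl
  obtain _|⟨c,l⟩ := l; · simp at hl
  obtain _|⟨d,l⟩ := l; · simp at hl
  obtain _|⟨e,l⟩ := l; · simp at hl
  obtain _|⟨f,l⟩ := l; · simp at hl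
  obtain _|⟨g,l⟩ := l; · simp at hl
  obtain _|⟨h,l⟩ := l; · simp at hl
  obtain _|⟨i,l⟩ := l; · simp at hl
  obtain _|⟨j,l⟩ := l; · simp at hl
  obtain _|⟨k,l⟩ := l; · simp at hl
  obtain _|⟨x,l⟩ := l
  · exact ⟨a, b, c, d, e, f, g, h, i, j, k, rfl⟩
  · simp at hl

-- the main case: an 11-character all-digit string
theorem validatePesel_eq_alt_of_digits (pesel : String) (a b c d e f g h i j k : Char)
    (hl : pesel.toList = [a,b,c,d,e,f,g,h,i,j,k])
    (da : a.isDigit) (db : b.isDigit) (dc : c.isDigit) (dd : d.isDigit) (de : e.isDigit)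
    (df : f.isDigit) (dg : g.isDigit) (dh : h.isDigit) (di : i.isDigit) (dj : j.isDigit)
    (dk : k.isDigit) :
    validatePesel pesel = validatePesel_alt pesel := by
  simp only [validatePesel, validatePesel_alt, pyIntAt, pyIntOfChar, PySem.Str.len_eq,
    PySem.Str.pyGet?_eq, PySem.Chars.pyGet?_eq_listPyGet?, hl]
  norm_num [List.foldl, List.zip, List.zipWith, List.map, List.sum,
    PySem.List.pyGet?, PySem.List.pyIdx?,
    show PySem.Int.mod 0 4 = 0 from by decide, show PySem.Int.mod 1 4 = 1 from by decide,
    show PySem.Int.mod 2 4 = 2 from by decide, show PySem.Int.mod 3 4 = 3 from by decide,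
    show PySem.Int.mod 4 4 = 0 from by decide, show PySem.Int.mod 5 4 = 1 from by decide,
    show PySem.Int.mod 6 4 = 2 from by decide, show PySem.Int.mod 7 4 = 3 from by decide,
    show PySem.Int.mod 8 4 = 0 from by decide, show PySem.Int.mod 9 4 = 1 from by decide,
    PySem.List.pyGetD,
    ofChars?_digit a da, ofChars?_digit b db, ofChars?_digit c dc, ofChars?_digit d dd,
    ofChars?_digit e de, ofChars?_digit f df, ofChars?_digit g dg, ofChars?_digit h dh,
    ofChars?_digit i di, ofChars?_digit j dj, ofChars?_digit k dk,
    PySem.Int.mod_eq_emod_of_pos,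
    show Int.toNat 2 = 2 from rfl, show Int.toNat 3 = 3 from rfl,
    show Int.toNat 4 = 4 from rfl, show Int.toNat 5 = 5 from rfl,
    show Int.toNat 6 = 6 from rfl, show Int.toNat 7 = 7 from rfl,
    show Int.toNat 8 = 8 from rfl, show Int.toNat 9 = 9 from rfl,
    show PySem.List.pyRange 0 10 1 = [0,1,2,3,4,5,6,7,8,9] from by decide]
  have Ba := digit_bounds a da; have Bb := digit_bounds b db; have Bc := digit_bounds c dc
  have Bd := digit_bounds d dd; have Be := digit_bounds e de; have Bf := digit_bounds f df
  have Bg := digit_bounds g dg; have Bh := digit_bounds h dh; have Bi := digit_bounds i di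
  have Bj := digit_bounds j dj; have Bk := digit_bounds k dk
  split_ifs <;> (rw [Bool.eq_iff_iff]; simp only [beq_iff_eq]) <;> omega

-- ===== VERDICT (by name: the statement is the Claim_ definition above) =====
theorem validatePesel_spec : Claim_equal_validatePesel := by
  unfold Claim_equal_validatePesel Spec_validatePesel
  intro pesel _ pre
  by_cases hlen : pesel.toList.length = 11
  · obtain ⟨a, b, c, d, e, f, g, h, i, j, k, hl⟩ := exists11 pesel.toList hlen
    have hall := pre hlen
    rw [hl] at hall
    simp only [List.all_cons, List.all_nil, Bool.and_eq_true, and_true] at hall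
    obtain ⟨da, db, dc, dd, de, df, dg, dh, di, dj, dk⟩ := hall
    exact validatePesel_eq_alt_of_digits pesel a b c d e f g h i j k hl
      da db dc dd de df dg dh di dj dk
  · have hlen' : ((pesel.length : Int) ≠ 11) := by
      have hn : pesel.length ≠ 11 := by simpa using hlen
      exact_mod_cast hn
    simp [validatePesel, validatePesel_alt, PySem.Str.len_eq, hlen']
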